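-- pv_equiv track=rewrite | github.com/AsokTamang/Leetcode-DSA | basics/bitmanipulation.py | bruteclearithbit
-- ===== SOURCE A (Python) =====
-- def bruteclearithbit(n, indexx):
--     res = ""
--     ans = 0
--     while n > 0:
--         res += "0" if n % 2 == 0 else "1"
--         n = n // 2
--     res = list(res)
--     if indexx >= len(res):
--         res += ["0"] * (indexx - len(res) + 1)
--     if res[indexx] == "1":
--         res[indexx] = "0"
--     for i in range(len(res)):
--         ans += int(res[i]) * (2**i)
--     return ans
-- ===== SOURCE B (Python) =====
-- def bruteclearithbit(n, indexx):
--     p = 2 ** indexx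
--     return n - p * ((n // p) % 2)
-- ===== Notes on version B (the rewrite author's own statement) =====
-- stated objective: faster
-- what changed: Replaces A's build-a-binary-string loop, pad, clear-and-resum passes with the closed-form arithmetic n - 2**indexx * ((n // 2**indexx) % 2).
-- intended difference: For negative n (with indexx >= 0) A's while loop never runs so A always returns 0; B returns n with bit indexx of the two's-complement value cleared, the intended result of clearing a bit. — e.g. on bruteclearithbit(-5, 2): A returns 0, B returns -5
-- outside the precondition, e.g. on bruteclearithbit(5, -1): A returns 1, B returns 5.0; on bruteclearithbit(0, -1): A raises IndexError, B returns 0.0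
import Mathlib
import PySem

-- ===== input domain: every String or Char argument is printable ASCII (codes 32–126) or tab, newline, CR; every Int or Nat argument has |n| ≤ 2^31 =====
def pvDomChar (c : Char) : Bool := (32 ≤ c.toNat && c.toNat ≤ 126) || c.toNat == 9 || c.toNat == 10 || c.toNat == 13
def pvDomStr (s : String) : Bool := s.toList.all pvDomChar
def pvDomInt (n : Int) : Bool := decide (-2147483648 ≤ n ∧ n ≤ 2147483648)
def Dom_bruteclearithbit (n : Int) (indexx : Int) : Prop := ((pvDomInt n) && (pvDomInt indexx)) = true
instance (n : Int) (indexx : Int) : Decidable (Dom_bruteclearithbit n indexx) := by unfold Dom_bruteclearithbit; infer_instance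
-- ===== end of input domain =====

-- B replaces A's bit-string loop with the closed-form arithmetic n - 2^i * ((n // 2^i) % 2) (objective: faster).
-- ===== PORT A =====
-- the 'while n > 0' loop: appends "0"/"1" for each bit, LSB first
def pvALoop (n : Int) (res : List String) : List String :=
  if 0 < n then
    pvALoop (PySem.Int.floordiv n 2)
      (res ++ [if PySem.Int.mod n 2 = 0 then "0" else "1"])
  else res
termination_by n.toNat
decreasing_by
  all_goals
    rw [PySem.Int.floordiv_eq_ediv_of_pos (by omega)]
    omega

def bruteclearithbit (n : Int) (indexx : Int) : Int :=
  let res0 := pvALoop n []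
  let res1 :=
    if (res0.length : Int) ≤ indexx then
      res0 ++ List.replicate (indexx - (res0.length : Int) + 1).toNat "0"
    else res0
  let res2 :=
    match PySem.List.pyGet? res1 indexx with
    | some s => if s = "1" then PySem.List.pySetD res1 indexx "0" else res1
    | none => res1   -- Python raises IndexError here; excluded by Pre_
  -- 'for i in range(len(res)): ans += int(res[i]) * 2**i'; i < len and every entry is "0"/"1",
  -- so getD are exact for res[i] and int(res[i])
  (List.range res2.length).foldl
    (fun ans i => ans + (PySem.Int.ofStr? (res2.getD i "0")).getD 0 * 2 ^ i) 0

-- ===== PORT B =====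
def bruteclearithbit_alt (n : Int) (indexx : Int) : Int :=
  if 0 ≤ indexx then
    let p : Int := 2 ^ indexx.toNat
    n - p * PySem.Int.mod (PySem.Int.floordiv n p) 2
  else 0   -- Python's 2 ** indexx is a float here (not an int); excluded by Pre_

-- ===== PRECONDITION & SPEC =====
-- Pre_ excludes negative indexx: there A either raises IndexError or clears a bit picked by
-- Python's accidental negative-index wraparound, while B's 2 ** indexx is a float (not an int).
def Pre_bruteclearithbit (n : Int) (indexx : Int) : Prop := 0 ≤ indexx
instance (n : Int) (indexx : Int) : Decidable (Pre_bruteclearithbit n indexx) := by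
  unfold Pre_bruteclearithbit; infer_instance
def pvWitness_bruteclearithbit : Int × Int := (13, 2)

-- On negative n A returns 0 regardless of the input (its while loop never runs), while B returns
-- n with bit indexx of the two's-complement value cleared, the intended result of 'clear a bit'.
def D_bruteclearithbit (n : Int) (indexx : Int) : Prop := n < 0
instance (n : Int) (indexx : Int) : Decidable (D_bruteclearithbit n indexx) := by
  unfold D_bruteclearithbit; infer_instance

def Spec_bruteclearithbit (n : Int) (indexx : Int) (out : Int) : Prop :=
  ¬ D_bruteclearithbit n indexx → out = bruteclearithbit_alt n indexx
instance (n : Int) (indexx : Int) (out : Int) : Decidable (Spec_bruteclearithbit n indexx out) := by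
  unfold Spec_bruteclearithbit; infer_instance

def pvDiffWitness_bruteclearithbit : Int × Int := (-5, 2)
def pvDiffWitnessOut_bruteclearithbit : Int × Int := (0, -5)

-- ===== CLAIM (what is proved, stated in full; the proofs are below) =====
def Claim_unchanged_bruteclearithbit : Prop := ∀ (n : Int) (indexx : Int), Dom_bruteclearithbit n indexx → Pre_bruteclearithbit n indexx → Spec_bruteclearithbit n indexx (bruteclearithbit n indexx)
def Claim_changed_bruteclearithbit : Prop := Dom_bruteclearithbit (pvDiffWitness_bruteclearithbit.1) (pvDiffWitness_bruteclearithbit.2) ∧ Pre_bruteclearithbit (pvDiffWitness_bruteclearithbit.1) (pvDiffWitness_bruteclearithbit.2) ∧ D_bruteclearithbit (pvDiffWitness_bruteclearithbit.1) (pvDiffWitness_bruteclearithbit.2) ∧ bruteclearithbit (pvDiffWitness_bruteclearithbit.1) (pvDiffWitness_bruteclearithbit.2) = pvDiffWitnessOut_bruteclearithbit.1 ∧ bruteclearithbit_alt (pvDiffWitness_bruteclearithbit.1) (pvDiffWitness_bruteclearithbit.2) = pvDiffWitnessOut_bruteclearithbit.2 ∧ pvDiffWitnessOut_bruteclearithbit.1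 ≠ pvDiffWitnessOut_bruteclearithbit.2
def Claim_exact_bruteclearithbit : Prop := ∀ (n : Int) (indexx : Int), Dom_bruteclearithbit n indexx → Pre_bruteclearithbit n indexx → D_bruteclearithbit n indexx → bruteclearithbit n indexx ≠ bruteclearithbit_alt n indexx

-- ===== LEMMAS AND PROOFS =====

-- the digit value int(s) computes for the entries A builds
def pvDigit (s : String) : Int := (PySem.Int.ofStr? s).getD 0

-- the fold's closed companion: value of an LSB-first digit list
def pvRecVal : List String → Int
  | [] => 0
  | s :: t => pvDigit s + 2 * pvRecVal t

theorem pvRecVal_append_singleton (l : List String) (x : String) :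
    pvRecVal (l ++ [x]) = pvRecVal l + pvDigit x * 2 ^ l.length := by
  induction l with
  | nil => simp [pvRecVal]
  | cons s t ih => simp [pvRecVal, ih]; ring

theorem pvFold_eq_recVal (l : List String) :
    (List.range l.length).foldl
      (fun ans i => ans + (PySem.Int.ofStr? (l.getD i "0")).getD 0 * 2 ^ i) 0 = pvRecVal l := by
  induction l using List.reverseRecOn with
  | nil => simp [pvRecVal]
  | append_singleton t x ih =>
      rw [List.length_append, List.length_singleton, List.range_succ, List.foldl_append]
      rw [PySem.List.foldl_congr_mem (List.range t.length) _
            (fun ans i => ans + (PySem.Int.ofStr? (t.getD i "0")).getD 0 * 2 ^ i) 0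
            (by
              intro a i hi
              have hlt : i < t.length := List.mem_range.mp hi
              rw [List.getD_append _ _ _ _ hlt]),
          ih, pvRecVal_append_singleton]
      have hx : (t ++ [x]).getD t.length "0" = x := by
        simp [List.getD]
      simp only [List.foldl_cons, List.foldl_nil]
      rw [hx]
      simp [pvDigit]

theorem pvALoop_acc (n : Int) (res : List String) :
    pvALoop n res = res ++ pvALoop n [] := by
  by_cases h : 0 < n
  · rw [pvALoop, if_pos h, pvALoop_acc (PySem.Int.floordiv n 2)]
    conv_rhs => rw [pvALoop, if_pos h, pvALoop_acc (PySem.Int.floordiv n 2)]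
    simp
  · rw [pvALoop, if_neg h, pvALoop, if_neg h]; simp
termination_by n.toNat
decreasing_by
  all_goals
    rw [PySem.Int.floordiv_eq_ediv_of_pos (by omega)]
    omega

theorem pvALoop_nonpos {n : Int} (h : ¬ 0 < n) : pvALoop n [] = [] := by
  rw [pvALoop, if_neg h]

theorem pvALoop_pos {n : Int} (h : 0 < n) :
    pvALoop n [] = (if PySem.Int.mod n 2 = 0 then "0" else "1") :: pvALoop (PySem.Int.floordiv n 2) [] := by
  rw [pvALoop, if_pos h, pvALoop_acc]; simp

-- every entry of the list A builds is "0" or "1"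
theorem pvALoop_mem (n : Int) {s : String} (h : s ∈ pvALoop n []) : s = "0" ∨ s = "1" := by
  by_cases hpos : 0 < n
  · rw [pvALoop_pos hpos] at h
    rcases List.mem_cons.mp h with h | h
    · subst h; split <;> simp
    · exact pvALoop_mem (PySem.Int.floordiv n 2) h
  · rw [pvALoop_nonpos hpos] at h; simp at h
termination_by n.toNat
decreasing_by
  all_goals
    rw [PySem.Int.floordiv_eq_ediv_of_pos (by omega)]
    omega

-- the digit at position k of A's bit list is (n // 2^k) % 2  (for 0 ≤ n)
theorem pvALoop_digit (k : Nat) : ∀ (n : Int), 0 ≤ n →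
    pvDigit ((pvALoop n []).getD k "0") = PySem.Int.mod (PySem.Int.floordiv n (2 ^ k)) 2 := by
  induction k with
  | zero =>
      intro n hn
      have hf : PySem.Int.floordiv n (2 ^ 0) = n := by
        rw [PySem.Int.floordiv_eq_ediv_of_pos (by norm_num)]; simp
      rw [hf]
      by_cases h : 0 < n
      · rw [pvALoop_pos h, PySem.Int.mod_eq_emod_of_pos (by norm_num)]
        simp only [List.getD_cons_zero]
        by_cases h2 : n % 2 = 0
        · rw [if_pos h2, h2]; decide
        · have h1 : n % 2 = 1 := by omega
          rw [if_neg h2, h1]; decide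
      · have hz : n = 0 := by omega
        subst hz
        rw [pvALoop_nonpos (by norm_num)]
        decide
  | succ k ih =>
      intro n hn
      by_cases h : 0 < n
      · rw [pvALoop_pos h]
        have hh : ((if PySem.Int.mod n 2 = 0 then "0" else "1") :: pvALoop (PySem.Int.floordiv n 2) []).getD (k+1) "0"
            = (pvALoop (PySem.Int.floordiv n 2) []).getD k "0" := by
          rfl
        rw [hh, ih (PySem.Int.floordiv n 2) (by
          rw [PySem.Int.floordiv_eq_ediv_of_pos (by norm_num)]; positivity)]
        congr 1
        rw [PySem.Int.floordiv_eq_ediv_of_pos (by norm_num),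
            PySem.Int.floordiv_eq_ediv_of_pos (by positivity),
            PySem.Int.floordiv_eq_ediv_of_pos (by positivity)]
        rw [Int.ediv_ediv_of_nonneg (show (0:Int) ≤ 2 by norm_num)]
        ring_nf
      · have hz : n = 0 := by omega
        subst hz
        rw [pvALoop_nonpos (by norm_num)]
        have hf : PySem.Int.floordiv 0 ((2:Int) ^ (k+1)) = 0 := by
          rw [PySem.Int.floordiv_eq_ediv_of_pos (by positivity)]; simp
        rw [hf, List.getD_nil]
        decide

theorem pvRecVal_replicate (j : Nat) : pvRecVal (List.replicate j "0") = 0 := by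
  induction j with
  | zero => simp [pvRecVal]
  | succ j ih =>
      rw [List.replicate_succ, pvRecVal, ih]
      decide

theorem pvRecVal_append (l l' : List String) :
    pvRecVal (l ++ l') = pvRecVal l + 2 ^ l.length * pvRecVal l' := by
  induction l with
  | nil => simp [pvRecVal]
  | cons s t ih => simp [pvRecVal, ih]; ring

-- value of A's bit list is n  (for 0 ≤ n)
theorem pvRecVal_pvALoop (n : Int) (hn : 0 ≤ n) : pvRecVal (pvALoop n []) = n := by
  by_cases hpos : 0 < n
  · rw [pvALoop_pos hpos, pvRecVal]
    have hdvd : 0 ≤ PySem.Int.floordiv n 2 := by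
      rw [PySem.Int.floordiv_eq_ediv_of_pos (by norm_num)]; positivity
    rw [pvRecVal_pvALoop (PySem.Int.floordiv n 2) hdvd]
    have hsum := PySem.Int.floordiv_mul_add_mod n 2
    have hm0 : 0 ≤ PySem.Int.mod n 2 := PySem.Int.mod_nonneg n (by norm_num)
    have hm2 : PySem.Int.mod n 2 < 2 := PySem.Int.mod_lt n (by norm_num)
    by_cases he : PySem.Int.mod n 2 = 0
    · rw [if_pos he]
      have hd : pvDigit "0" = 0 := by decide
      rw [hd]; omega
    · rw [if_neg he]
      have hd1 : pvDigit "1" = 1 := by decide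
      rw [hd1]; omega
  · rw [pvALoop_nonpos hpos, pvRecVal]; omega
termination_by n.toNat
decreasing_by
  all_goals
    rw [PySem.Int.floordiv_eq_ediv_of_pos (by omega)]
    omega

-- clearing a digit subtracts its value
theorem pvRecVal_set : ∀ (l : List String) (k : Nat), k < l.length →
    pvRecVal (l.set k "0") = pvRecVal l - pvDigit (l.getD k "0") * 2 ^ k := by
  intro l
  induction l with
  | nil => intro k hk; simp at hk
  | cons s t ih =>
      intro k hk
      cases k with
      | zero =>
          simp only [List.set_cons_zero, pvRecVal, List.getD_cons_zero, pow_zero]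
          have hd : pvDigit "0" = 0 := by decide
          rw [hd]; ring
      | succ k =>
          simp only [List.set_cons_succ, pvRecVal, List.getD_cons_succ]
          rw [ih k (by simpa using hk)]
          ring

-- A computed on nonneg n, nonneg indexx
theorem pvA_closed (n : Int) (indexx : Int) (hn : 0 ≤ n) (hi : 0 ≤ indexx) :
    bruteclearithbit n indexx
      = n - 2 ^ indexx.toNat * PySem.Int.mod (PySem.Int.floordiv n (2 ^ indexx.toNat)) 2 := by
  obtain ⟨k, hk⟩ : ∃ k : Nat, indexx = (k : Int) := ⟨indexx.toNat, by omega⟩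
  subst hk
  simp only [Int.toNat_natCast]
  unfold bruteclearithbit
  dsimp only
  set L0 := pvALoop n [] with hL0
  have hdig : pvDigit (L0.getD k "0") = PySem.Int.mod (PySem.Int.floordiv n (2 ^ k)) 2 :=
    pvALoop_digit k n hn
  by_cases hpad : (L0.length : Int) ≤ (k : Int)
  · -- padding branch: the bit at k is "0", nothing is cleared
    rw [if_pos hpad]
    have hlen : L0.length ≤ k := by exact_mod_cast hpad
    have hrep : ((k : Int) - (L0.length : Int) + 1).toNat = k - L0.length + 1 := by omega
    rw [hrep]
    set res1 := L0 ++ List.replicate (k - L0.length + 1) "0" with hres1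
    have hlen1 : res1.length = k + 1 := by
      simp [hres1]; omega
    have hget : PySem.List.pyGet? res1 (k : Int) = some "0" := by
      rw [PySem.List.pyGet?_natCast]
      rw [List.getElem?_append_right (by omega), List.getElem?_replicate]
      rw [if_pos (by omega)]
    rw [hget]
    dsimp only
    rw [if_neg (by decide : ¬ ("0" : String) = "1")]
    rw [pvFold_eq_recVal res1, hres1, pvRecVal_append, pvRecVal_replicate,
        pvRecVal_pvALoop n hn]
    have hd0 : pvDigit (L0.getD k "0") = 0 := by
      rw [List.getD_eq_default _ _ hlen]; decide
    rw [hd0] at hdig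
    rw [← hdig]
    ring
  · -- no padding: index k is inside the bit list
    rw [if_neg hpad]
    have hlt : k < L0.length := by omega
    have hget : PySem.List.pyGet? L0 (k : Int) = some L0[k] := by
      rw [PySem.List.pyGet?_natCast, List.getElem?_eq_getElem hlt]
    rw [hget]
    dsimp only
    have hgetD : L0.getD k "0" = L0[k] := List.getD_eq_getElem _ _ hlt
    by_cases h1 : L0[k] = "1"
    · rw [if_pos h1, PySem.List.pySetD_natCast]
      rw [pvFold_eq_recVal, pvRecVal_set L0 k hlt, pvRecVal_pvALoop n hn, hdig]
      ring
    · rw [if_neg h1]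
      rw [pvFold_eq_recVal, pvRecVal_pvALoop n hn]
      have h0 : L0[k] = "0" := by
        rcases pvALoop_mem n (List.getElem_mem hlt) with h | h
        · exact h
        · exact absurd h h1
      have hd0 : pvDigit (L0.getD k "0") = 0 := by
        rw [hgetD, h0]; decide
      rw [hd0] at hdig
      rw [← hdig]
      ring

theorem pvA_neg (n : Int) (indexx : Int) (hn : n < 0) (hi : 0 ≤ indexx) :
    bruteclearithbit n indexx = 0 := by
  obtain ⟨k, hk⟩ : ∃ k : Nat, indexx = (k : Int) := ⟨indexx.toNat, by omega⟩
  subst hk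
  unfold bruteclearithbit
  dsimp only
  have hL0 : pvALoop n [] = [] := pvALoop_nonpos (by omega)
  rw [hL0]
  simp only [List.length_nil, Nat.cast_zero, List.nil_append]
  rw [if_pos (by omega : (0:Int) ≤ (k:Int))]
  have hrep : ((k : Int) - 0 + 1).toNat = k + 1 := by omega
  rw [hrep]
  have hget : PySem.List.pyGet? (List.replicate (k+1) "0") (k : Int) = some "0" := by
    rw [PySem.List.pyGet?_natCast, List.getElem?_replicate, if_pos (by omega)]
  rw [hget]
  dsimp only
  rw [if_neg (by decide : ¬ ("0" : String) = "1")]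
  rw [pvFold_eq_recVal, pvRecVal_replicate]

-- ===== VERDICT (by name: the statement is the Claim_ definition above) =====
theorem bruteclearithbit_spec : Claim_unchanged_bruteclearithbit := by
  intro n indexx _ hpre hnd
  have hn : 0 ≤ n := by
    unfold D_bruteclearithbit at hnd; omega
  unfold Pre_bruteclearithbit at hpre
  rw [pvA_closed n indexx hn hpre]
  simp [bruteclearithbit_alt, hpre]

theorem bruteclearithbit_changed : Claim_changed_bruteclearithbit := by
  unfold Claim_changed_bruteclearithbit
  refine ⟨by decide, by decide, by decide, ?_, by decide, by decide⟩
  exact pvA_neg (-5) 2 (by norm_num) (by norm_num)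

theorem bruteclearithbit_tight : Claim_exact_bruteclearithbit := by
  intro n indexx _ hpre hd
  unfold D_bruteclearithbit at hd
  unfold Pre_bruteclearithbit at hpre
  rw [pvA_neg n indexx hd hpre]
  simp only [bruteclearithbit_alt, if_pos hpre]
  intro heq
  have hm0 : 0 ≤ PySem.Int.mod (PySem.Int.floordiv n (2 ^ indexx.toNat)) 2 :=
    PySem.Int.mod_nonneg _ (by norm_num)
  have hp : (0:Int) < 2 ^ indexx.toNat := by positivity
  nlinarith [mul_nonneg (le_of_lt hp) hm0]
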